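-- pv_equiv track=rewrite | github.com/recinall/mhci_binding_predictor | peptide_analysis/sequence_variants.py | generate_sequence_variants
-- ===== SOURCE A (Python) =====
-- def generate_sequence_variants(sequenza):
--     """
--     Genera tutte le permutazioni possibili di una sequenza di amminoacidi,
--     dove alcune posizioni possono avere varianti.
--
--     Parametri:
--     sequenza (list): Una lista di liste, dove ogni lista interna contiene
--                     gli amminoacidi possibili per quella posizione.
--                     Esempio: [['A'], ['B', 'C'], ['D', 'E', 'F']]
--
--     Returns:
--     list: Lista di tutte le possibili stringhe permutate
--     """
--     risultato = [""]
--
--     for posizione in sequenza: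
--         nuove_combinazioni = []
--         for stringa_parziale in risultato:
--             for variante in posizione:
--                 nuove_combinazioni.append(stringa_parziale + variante)
--         risultato = nuove_combinazioni
--
--     return risultato
-- ===== SOURCE B (Python) =====
-- def generate_sequence_variants(sequenza):
--     def rec(i):
--         if i == len(sequenza):
--             return [""]
--         return [option + suffix for option in sequenza[i] for suffix in rec(i + 1)]
--     return rec(0)
-- ===== Notes on version B (the rewrite author's own statement) =====
-- stated objective: alternative
-- what changed: Replaced the iterative left fold that rebuilds the whole prefix list at each position with a recursion over the position index that builds each variant by prepending the current option to every suffix of the rest.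
import Mathlib
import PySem

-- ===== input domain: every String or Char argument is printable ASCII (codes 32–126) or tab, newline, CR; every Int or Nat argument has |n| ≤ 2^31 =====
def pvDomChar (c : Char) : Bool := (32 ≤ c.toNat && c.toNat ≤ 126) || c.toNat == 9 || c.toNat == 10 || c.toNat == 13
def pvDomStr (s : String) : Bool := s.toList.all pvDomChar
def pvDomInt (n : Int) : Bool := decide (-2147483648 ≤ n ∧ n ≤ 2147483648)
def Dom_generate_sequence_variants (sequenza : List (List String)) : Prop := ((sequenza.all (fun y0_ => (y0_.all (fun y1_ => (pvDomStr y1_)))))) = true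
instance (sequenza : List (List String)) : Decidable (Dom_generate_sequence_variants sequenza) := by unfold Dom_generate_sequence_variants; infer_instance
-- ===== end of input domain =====

-- B replaces A's iterative fold (rebuilding the full prefix list per position) by a
-- suffix recursion over positions; same output values and order (objective: alternative).

-- ===== PORT A =====
-- A: risultato starts as [""], and for each posizione the nested loops append
-- stringa_parziale + variante for every (stringa_parziale, variante) pair.
def generate_sequence_variants (sequenza : List (List String)) : List String :=
  sequenza.foldl
    (fun risultato posizione =>
      risultato.foldl
        (fun nuove stringa_parziale =>
          posizione.foldl (fun nuove variante => nuove ++ [stringa_parziale ++ variante]) nuove)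
        [])
    [""]

-- ===== PORT B =====
-- B: rec over the remaining positions; the double comprehension is flatMap/map.
def gsvRec : List (List String) → List String
  | [] => [""]
  | posizione :: rest => posizione.flatMap (fun option => (gsvRec rest).map (fun suffix => option ++ suffix))

def generate_sequence_variants_alt (sequenza : List (List String)) : List String :=
  gsvRec sequenza

-- ===== PRECONDITION & SPEC =====
def Spec_generate_sequence_variants (sequenza : List (List String)) (out : List String) : Prop := out = generate_sequence_variants_alt sequenza
instance (sequenza : List (List String)) (out : List String) : Decidable (Spec_generate_sequence_variants sequenza out) := by unfold Spec_generate_sequence_variants; infer_instance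

-- ===== CLAIM (what is proved, stated in full; the proofs are below) =====
def Claim_equal_generate_sequence_variants : Prop := ∀ (sequenza : List (List String)), Dom_generate_sequence_variants sequenza → Spec_generate_sequence_variants sequenza (generate_sequence_variants sequenza)

-- ===== LEMMAS AND PROOFS =====

-- A's innermost loop appends s ++ v for each v of posizione.
theorem gsv_inner (posizione : List String) (s : String) (nc : List String) :
    posizione.foldl (fun nuove variante => nuove ++ [s ++ variante]) nc
      = nc ++ posizione.map (fun v => s ++ v) := by
  induction posizione generalizing nc with
  | nil => simp
  | cons v vs ih => simp [List.foldl, ih]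

-- A's middle loop is a flatMap over the current partial results.
theorem gsv_middle (risultato : List String) (posizione : List String) (nc : List String) :
    risultato.foldl
      (fun nuove stringa_parziale =>
        posizione.foldl (fun nuove variante => nuove ++ [stringa_parziale ++ variante]) nuove)
      nc
      = nc ++ risultato.flatMap (fun s => posizione.map (fun v => s ++ v)) := by
  induction risultato generalizing nc with
  | nil => simp
  | cons s ss ih =>
    rw [List.foldl_cons, gsv_inner, ih, List.flatMap_cons, List.append_assoc]

-- A's outer fold, started from any accumulator, prepends each partial string to every suffix.
theorem gsv_main (sequenza : List (List String)) (acc : List String) :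
    sequenza.foldl
      (fun risultato posizione =>
        risultato.foldl
          (fun nuove stringa_parziale =>
            posizione.foldl (fun nuove variante => nuove ++ [stringa_parziale ++ variante]) nuove)
          [])
      acc
      = acc.flatMap (fun s => (gsvRec sequenza).map (fun suf => s ++ suf)) := by
  induction sequenza generalizing acc with
  | nil => simp [gsvRec]
  | cons p rest ih =>
    rw [List.foldl_cons, gsv_middle, List.nil_append, ih]
    simp [gsvRec, List.flatMap_assoc, List.flatMap_map, List.map_flatMap, List.map_map,
      Function.comp_def, String.append_assoc]

-- ===== VERDICT (by name: the statement is the Claim_ definition above) =====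
theorem generate_sequence_variants_spec : Claim_equal_generate_sequence_variants := by
  intro sequenza _
  unfold Spec_generate_sequence_variants generate_sequence_variants generate_sequence_variants_alt
  rw [gsv_main]
  simp
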